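-- pv_equiv track=rewrite | github.com/CoCorooxin/algorithme | main.py | positionTmp
-- ===== SOURCE A (Python) =====
-- def positionTmp(n, position_1,position_2):
--     position_tmp = []
--     for i in range(n, 0, -1):
--         if i in position_1 or i in position_2:
--             continue
--         else:
--             position_tmp.append(i)
--     return position_tmp
-- ===== SOURCE B (Python) =====
-- def positionTmp(n, position_1, position_2):
--     # Gap-based: keep only the excluded values that can matter, sorted descending;
--     # then emit the maximal runs of consecutive kept numbers between them.
--     ex = sorted((x for x in set(position_1) | set(position_2) if 1 <= x <= n),
--                 reverse=True)
--     out = []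
--     hi = n
--     for x in ex:
--         out.extend(range(hi, x, -1))
--         hi = x - 1
--     out.extend(range(hi, 0, -1))
--     return out
-- ===== Notes on version B (the rewrite author's own statement) =====
-- stated objective: faster
-- what changed: Replaces A's down-counting loop with a membership test of both lists per candidate by a gap-based scheme: the excluded values in [1,n] are deduplicated and sorted descending once, then the answer is emitted as the maximal runs of consecutive numbers between successive excluded values, so no per-candidate membership test is performed at all.
import Mathlib
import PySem

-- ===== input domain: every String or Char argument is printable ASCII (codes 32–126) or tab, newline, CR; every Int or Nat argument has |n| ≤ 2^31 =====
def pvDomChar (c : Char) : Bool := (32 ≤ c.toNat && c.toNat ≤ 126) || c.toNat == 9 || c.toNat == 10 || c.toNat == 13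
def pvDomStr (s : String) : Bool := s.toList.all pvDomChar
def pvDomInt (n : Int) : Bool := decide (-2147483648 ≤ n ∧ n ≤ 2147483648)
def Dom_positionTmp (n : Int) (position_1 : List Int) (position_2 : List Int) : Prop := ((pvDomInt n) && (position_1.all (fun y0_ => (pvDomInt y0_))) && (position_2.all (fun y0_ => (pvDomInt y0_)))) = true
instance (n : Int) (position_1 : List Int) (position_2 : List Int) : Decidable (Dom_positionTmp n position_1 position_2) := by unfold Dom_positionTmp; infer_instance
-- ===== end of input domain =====

-- B replaces A's per-candidate membership tests by sorting the relevant excluded values descending once and emitting the maximal runs of kept numbers between them (faster in a timing run).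


-- ===== PORT A =====
-- for i in range(n, 0, -1): if i in position_1 or i in position_2: continue else: position_tmp.append(i)
def positionTmp (n : Int) (position_1 : List Int) (position_2 : List Int) : List Int :=
  (PySem.List.pyRange n 0 (-1)).foldl
    (fun position_tmp i =>
      if i ∈ position_1 ∨ i ∈ position_2 then position_tmp else position_tmp ++ [i]) []

-- ===== PORT B =====
-- ex = sorted((x for x in set(position_1) | set(position_2) if 1 <= x <= n), reverse=True)
-- hi = n; for x in ex: out.extend(range(hi, x, -1)); hi = x - 1
-- out.extend(range(hi, 0, -1))          (the loop state is the pair (out, hi))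
def positionTmp_alt (n : Int) (position_1 : List Int) (position_2 : List Int) : List Int :=
  let ex := PySem.List.sorted
    ((PySem.Set.union (PySem.Set.ofList position_1) position_2).filter
      (fun x => 1 ≤ x ∧ x ≤ n)) (fun x => x) true
  let st := ex.foldl
    (fun (st : List Int × Int) x => (st.1 ++ PySem.List.pyRange st.2 x (-1), x - 1)) ([], n)
  st.1 ++ PySem.List.pyRange st.2 0 (-1)

-- ===== PRECONDITION & SPEC =====
def Spec_positionTmp (n : Int) (position_1 : List Int) (position_2 : List Int) (out : List Int) : Prop := out = positionTmp_alt n position_1 position_2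
instance (n : Int) (position_1 : List Int) (position_2 : List Int) (out : List Int) : Decidable (Spec_positionTmp n position_1 position_2 out) := by unfold Spec_positionTmp; infer_instance

-- ===== CLAIM (what is proved, stated in full; the proofs are below) =====
def Claim_equal_positionTmp : Prop := ∀ (n : Int) (position_1 : List Int) (position_2 : List Int), Dom_positionTmp n position_1 position_2 → Spec_positionTmp n position_1 position_2 (positionTmp n position_1 position_2)

-- ===== LEMMAS AND PROOFS =====

-- the runs emitted by B's loop, written as a recursion over ex
def pvGaps : Int → List Int → List Int
  | hi, [] => PySem.List.pyRange hi 0 (-1)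
  | hi, x :: xs => PySem.List.pyRange hi x (-1) ++ pvGaps (x - 1) xs

theorem foldl_gap_shift (ex : List Int) (acc : List Int) (hi : Int) :
    ex.foldl (fun (st : List Int × Int) x => (st.1 ++ PySem.List.pyRange st.2 x (-1), x - 1)) (acc, hi)
      = (acc ++ (ex.foldl (fun (st : List Int × Int) x => (st.1 ++ PySem.List.pyRange st.2 x (-1), x - 1)) ([], hi)).1,
         (ex.foldl (fun (st : List Int × Int) x => (st.1 ++ PySem.List.pyRange st.2 x (-1), x - 1)) ([], hi)).2) := by
  induction ex generalizing acc hi with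
  | nil => simp
  | cons x xs ih =>
    simp only [List.foldl_cons]
    rw [ih (acc ++ PySem.List.pyRange hi x (-1)) (x - 1),
        ih (List.nil ++ PySem.List.pyRange hi x (-1)) (x - 1)]
    simp [List.append_assoc]

theorem foldl_gap_eq_pvGaps (ex : List Int) (hi : Int) :
    (ex.foldl (fun (st : List Int × Int) x => (st.1 ++ PySem.List.pyRange st.2 x (-1), x - 1)) ([], hi)).1
      ++ PySem.List.pyRange
          (ex.foldl (fun (st : List Int × Int) x => (st.1 ++ PySem.List.pyRange st.2 x (-1), x - 1)) ([], hi)).2 0 (-1)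
      = pvGaps hi ex := by
  induction ex generalizing hi with
  | nil => simp [pvGaps]
  | cons x xs ih =>
    simp only [List.foldl_cons]
    rw [foldl_gap_shift xs (List.nil ++ PySem.List.pyRange hi x (-1)) (x - 1)]
    simp only [List.nil_append, pvGaps, List.append_assoc]
    rw [ih (x - 1)]

-- splitting the countdown range [hi..1] at x (0 ≤ x ≤ hi)
theorem pyRange_countdown_split (hi x : Int) (h0 : 0 ≤ x) (h1 : x ≤ hi) :
    PySem.List.pyRange hi 0 (-1)
      = PySem.List.pyRange hi x (-1) ++ PySem.List.pyRange x 0 (-1) := by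
  have hsplit := PySem.List.pyRange_one_append 1 (x + 1) (hi + 1) (by omega) (by omega)
  have h01 : (0 : Int) + 1 = 1 := by norm_num
  rw [PySem.List.pyRange_neg_one_eq_reverse hi 0, h01, hsplit, List.reverse_append,
      ← PySem.List.pyRange_neg_one_eq_reverse hi x]
  congr 1
  rw [PySem.List.pyRange_neg_one_eq_reverse x 0, h01]

-- B's runs are the filter of the countdown range by non-membership in ex
theorem pvGaps_eq_filter (ex : List Int) (hi : Int) (hpw : ex.Pairwise (· > ·))
    (hmem : ∀ y ∈ ex, 1 ≤ y ∧ y ≤ hi) :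
    pvGaps hi ex = (PySem.List.pyRange hi 0 (-1)).filter (fun j => decide (j ∉ ex)) := by
  induction ex generalizing hi with
  | nil => simp [pvGaps]
  | cons x xs ih =>
    rcases List.pairwise_cons.mp hpw with ⟨hx, hxs⟩
    obtain ⟨hx1, hxhi⟩ := hmem x List.mem_cons_self
    rw [pvGaps, pyRange_countdown_split hi x (by omega) hxhi, List.filter_append]
    have hc1 : (PySem.List.pyRange hi x (-1)).filter (fun j => decide (j ∉ x :: xs))
        = PySem.List.pyRange hi x (-1) := by
      apply List.filter_eq_self.mpr
      intro j hj
      obtain ⟨hjx, hjhi⟩ := (PySem.List.mem_pyRange_neg_one).mp hj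
      have hnot : j ∉ x :: xs := by
        intro hm
        rcases List.mem_cons.mp hm with rfl | hm2
        · omega
        · have := hx j hm2; omega
      simp [hnot]
    have hcons : PySem.List.pyRange x 0 (-1) = x :: PySem.List.pyRange (x - 1) 0 (-1) :=
      PySem.List.pyRange_neg_one_cons (by omega)
    rw [hc1, hcons, List.filter_cons]
    have hxin : x ∈ x :: xs := List.mem_cons_self
    simp only [hxin, not_true, decide_false, Bool.false_eq_true, if_false]
    congr 1
    rw [ih (x - 1) hxs (fun y hy => by
      obtain ⟨h1y, _⟩ := hmem y (List.mem_cons_of_mem _ hy)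
      exact ⟨h1y, by have := hx y hy; omega⟩)]
    apply List.filter_congr
    intro j hj
    obtain ⟨hj0, hjx⟩ := (PySem.List.mem_pyRange_neg_one).mp hj
    have hne : j ≠ x := by omega
    simp [List.mem_cons, hne]

-- A's loop is the filter of the countdown range by "not excluded"
theorem positionTmp_eq_filter (n : Int) (p1 p2 : List Int) :
    positionTmp n p1 p2
      = (PySem.List.pyRange n 0 (-1)).filter (fun i => ¬(i ∈ p1 ∨ i ∈ p2)) := by
  unfold positionTmp
  have hfun : (fun (acc : List Int) (i : Int) =>
        if i ∈ p1 ∨ i ∈ p2 then acc else acc ++ [i])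
      = (fun acc i => if ¬(i ∈ p1 ∨ i ∈ p2) then acc ++ [i] else acc) := by
    funext acc i; by_cases h : i ∈ p1 ∨ i ∈ p2 <;> simp [h]
  rw [hfun, PySem.List.foldl_append_ite_eq_filter, List.nil_append]

-- B's sorted excluded list is strictly descending, with elements in [1, n] and A's membership
theorem ex_pairwise (n : Int) (p1 p2 : List Int) :
    (PySem.List.sorted ((PySem.Set.union (PySem.Set.ofList p1) p2).filter
        (fun x => 1 ≤ x ∧ x ≤ n)) (fun x => x) true).Pairwise (· > ·) := by
  have h1 := PySem.List.sorted_pairwise_rev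
    ((PySem.Set.union (PySem.Set.ofList p1) p2).filter (fun x => 1 ≤ x ∧ x ≤ n)) (fun x : Int => x)
  have hnd : ((PySem.Set.union (PySem.Set.ofList p1) p2).filter (fun x => 1 ≤ x ∧ x ≤ n)).Nodup :=
    (PySem.Set.nodup_union _ _ (PySem.Set.nodup_ofList p1)).filter _
  have h2 := (PySem.List.sorted_perm ((PySem.Set.union (PySem.Set.ofList p1) p2).filter
      (fun x => 1 ≤ x ∧ x ≤ n)) (fun x : Int => x) true).nodup_iff.mpr hnd
  have := List.Pairwise.and h1 (List.nodup_iff_pairwise_ne.mp h2)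
  exact this.imp (fun hab => lt_of_le_of_ne hab.1 (Ne.symm hab.2))

theorem mem_ex (n : Int) (p1 p2 : List Int) (j : Int) :
    j ∈ PySem.List.sorted ((PySem.Set.union (PySem.Set.ofList p1) p2).filter
        (fun x => 1 ≤ x ∧ x ≤ n)) (fun x => x) true
      ↔ ((j ∈ p1 ∨ j ∈ p2) ∧ (1 ≤ j ∧ j ≤ n)) := by
  rw [PySem.List.mem_sorted, List.mem_filter]
  simp [PySem.Set.mem_union, PySem.Set.mem_ofList]

theorem positionTmp_eq_alt (n : Int) (p1 p2 : List Int) :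
    positionTmp n p1 p2 = positionTmp_alt n p1 p2 := by
  rw [positionTmp_eq_filter, positionTmp_alt]
  rw [foldl_gap_eq_pvGaps,
    pvGaps_eq_filter _ n (ex_pairwise n p1 p2)
      (fun y hy => ((mem_ex n p1 p2 y).mp hy).2)]
  apply List.filter_congr
  intro j hj
  obtain ⟨hj0, hjn⟩ := (PySem.List.mem_pyRange_neg_one).mp hj
  simp [show 1 ≤ j by omega, hjn]

-- ===== VERDICT (by name: the statement is the Claim_ definition above) =====
theorem positionTmp_spec : Claim_equal_positionTmp := by
  intro n p1 p2 _
  exact positionTmp_eq_alt n p1 p2
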